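-- pv_equiv track=rewrite | github.com/sameetandpotatoes/Swocker | swocker/company.py | find_relevant_key
-- ===== SOURCE A (Python) =====
-- def find_relevant_key(name):
-- 	array = name.lower().split()
-- 	fluff = [
-- 		'inc.',
-- 		'inc',
-- 		'co.',
-- 		'co',
-- 		'company',
-- 		'llc',
-- 		'the',
-- 		'corp.',
-- 		'corporation',
-- 		'group'
-- 		#TODO add more words here or even do this in a separate script
-- 	]
-- 	for f in fluff:
-- 		if f in array:
-- 			array.pop(array.index(f))
-- 	return ' '.join(array)
-- ===== SOURCE B (Python) =====
-- def find_relevant_key(name):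
-- 	fluff = {
-- 		'inc.',
-- 		'inc',
-- 		'co.',
-- 		'co',
-- 		'company',
-- 		'llc',
-- 		'the',
-- 		'corp.',
-- 		'corporation',
-- 		'group'
-- 	}
-- 	removed = set()
-- 	result = []
-- 	for w in name.lower().split():
-- 		if w in fluff and w not in removed:
-- 			removed.add(w)
-- 		else:
-- 			result.append(w)
-- 	return ' '.join(result)
-- ===== Notes on version B (the rewrite author's own statement) =====
-- stated objective: alternative
-- what changed: A makes one membership test plus an index/pop scan over the word list per fluff word; B makes a single forward pass over the words, consulting a fluff set and a set of already-dropped fluff words so that only each fluff word's first occurrence is skipped.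
import Mathlib
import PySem

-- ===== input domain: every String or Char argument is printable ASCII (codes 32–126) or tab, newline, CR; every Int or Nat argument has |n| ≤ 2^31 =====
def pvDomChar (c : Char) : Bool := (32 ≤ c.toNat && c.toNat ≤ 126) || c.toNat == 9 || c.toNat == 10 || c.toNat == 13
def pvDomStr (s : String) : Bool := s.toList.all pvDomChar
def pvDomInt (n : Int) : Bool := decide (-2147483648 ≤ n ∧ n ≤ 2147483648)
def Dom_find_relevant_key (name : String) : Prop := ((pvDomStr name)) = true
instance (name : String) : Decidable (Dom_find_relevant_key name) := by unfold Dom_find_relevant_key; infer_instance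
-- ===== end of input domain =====

-- B replaces A's per-fluff-word scan-and-pop passes over the word list by one forward pass
-- over the words with a fluff set and a set of already-dropped fluff words (objective: alternative single-sweep algorithm).


-- ===== PORT A =====
-- A's fluff list, in A's order
def fluffA : List String :=
  ["inc.", "inc", "co.", "co", "company", "llc", "the", "corp.", "corporation", "group"]

-- one iteration of A's loop body: 'if f in array: array.pop(array.index(f))'
def stepA (a : List String) (f : String) : List String :=
  if a.contains f then
    match PySem.List.index? a f with
    | some i => ((PySem.List.pop? a (i : Int)).map Prod.snd).getD a
    | none => a
  else a

def find_relevant_key (name : String) : String :=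
  let array := PySem.Str.split₀ (PySem.Str.lower name)
  PySem.Str.join " " (fluffA.foldl stepA array)

-- ===== PORT B =====
-- B's fluff set
def fluffB : PySem.Set String :=
  PySem.Set.ofList ["inc.", "inc", "co.", "co", "company", "llc", "the", "corp.", "corporation", "group"]

-- B's single pass: skip the first occurrence of each fluff word, keep everything else
def passB (ws : List String) (removed : PySem.Set String) : List String :=
  match ws with
  | [] => []
  | w :: rest =>
    if fluffB.contains w && !(removed.contains w) then
      passB rest (PySem.Set.add removed w)
    else
      w :: passB rest removed

def find_relevant_key_alt (name : String) : String :=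
  PySem.Str.join " " (passB (PySem.Str.split₀ (PySem.Str.lower name)) PySem.Set.empty)

-- ===== PRECONDITION & SPEC =====
def Spec_find_relevant_key (name : String) (out : String) : Prop := out = find_relevant_key_alt name
instance (name : String) (out : String) : Decidable (Spec_find_relevant_key name out) := by unfold Spec_find_relevant_key; infer_instance

-- ===== CLAIM (what is proved, stated in full; the proofs are below) =====
def Claim_equal_find_relevant_key : Prop := ∀ (name : String), Dom_find_relevant_key name → Spec_find_relevant_key name (find_relevant_key name)

-- ===== LEMMAS AND PROOFS =====

-- A's loop body is 'erase the first occurrence of f' (no-op if absent)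
theorem stepA_eq_erase (a : List String) (f : String) : stepA a f = a.erase f := by
  unfold stepA
  by_cases h : f ∈ a
  · obtain ⟨i, hidx⟩ := Option.isSome_iff_exists.mp ((PySem.List.index?_isSome_iff a f).mpr h)
    obtain ⟨pre, suf, rfl, rfl, hnp⟩ := (PySem.List.index?_eq_some_iff _ f i).mp hidx
    have hlt : pre.length < (pre ++ f :: suf).length := by simp
    simp only [hidx, List.contains_eq_mem, h, decide_true, if_true]
    rw [PySem.List.pop?_natCast _ pre.length hlt]
    rw [List.erase_append_right _ hnp, List.erase_cons_head]
    simp [List.eraseIdx_append]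
  · simp [List.contains_eq_mem, h, List.erase_of_not_mem h]

-- folding erase over any list of words starting from [] gives []
theorem foldl_erase_nil (fs : List String) : fs.foldl (fun a f => a.erase f) ([] : List String) = [] := by
  induction fs with
  | nil => rfl
  | cons f fs ih => simpa using ih

-- if no word of fs equals w, folding erase over fs keeps the head w
theorem foldl_erase_cons_of_not_mem (fs : List String) (w : String) (ws : List String)
    (h : w ∉ fs) : fs.foldl (fun a f => a.erase f) (w :: ws) = w :: fs.foldl (fun a f => a.erase f) ws := by
  induction fs generalizing ws with
  | nil => rfl
  | cons f fs ih =>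
    have hne : w ≠ f := fun e => h (e ▸ List.mem_cons_self)
    have : (w :: ws).erase f = w :: ws.erase f := by
      rw [List.erase_cons_tail]
      simp [hne]
    simp only [List.foldl_cons, this]
    exact ih (ws.erase f) (fun hm => h (List.mem_cons_of_mem _ hm))

-- erase is right-commutative, so folding it over a permutation gives the same result
theorem foldl_erase_perm {fs fs' : List String} (hp : fs.Perm fs') (ws : List String) :
    fs.foldl (fun a f => a.erase f) ws = fs'.foldl (fun a f => a.erase f) ws := by
  haveI : RightCommutative (fun (a : List String) f => a.erase f) :=
    ⟨fun a x y => List.erase_comm (l := a) x y⟩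
  exact hp.foldl_eq ws

-- the generic single pass, parameterised by the set of still-active fluff words
def passGen (fs : List String) (ws : List String) : List String :=
  match ws with
  | [] => []
  | w :: rest => if w ∈ fs then passGen (fs.erase w) rest else w :: passGen fs rest

-- the single pass computes the left fold of erase, for distinct active words
theorem passGen_eq_foldl (ws : List String) : ∀ (fs : List String), fs.Nodup →
    passGen fs ws = fs.foldl (fun a f => a.erase f) ws := by
  induction ws with
  | nil => intro fs _; simp [passGen, foldl_erase_nil]
  | cons w rest ih =>
    intro fs hnd
    by_cases h : w ∈ fs
    · have hperm : fs.Perm (w :: fs.erase w) := List.perm_cons_erase h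
      rw [passGen, if_pos h, ih _ (hnd.erase w), foldl_erase_perm hperm]
      simp [List.erase_cons_head]
    · rw [passGen, if_neg h, ih fs hnd, foldl_erase_cons_of_not_mem fs w rest h]

-- B's pass with a 'removed' set is the generic pass over the still-active fluff words
theorem passB_eq_passGen (ws : List String) : ∀ (removed : PySem.Set String),
    passB ws removed = passGen (fluffA.filter (fun f => f ∉ removed)) ws := by
  induction ws with
  | nil => intro removed; simp [passB, passGen]
  | cons w rest ih =>
    intro removed
    have hmemB : (fluffB.contains w && !(PySem.Set.contains removed w)) = true ↔
        w ∈ fluffA.filter (fun f => f ∉ removed) := by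
      simp [fluffB, fluffA, PySem.Set.contains, List.mem_filter, PySem.Set.mem_ofList,
        List.contains_eq_mem]
    by_cases h : w ∈ fluffA.filter (fun f => f ∉ removed)
    · rw [passB, if_pos (hmemB.mpr h), ih (PySem.Set.add removed w), passGen, if_pos h]
      congr 1
      have hnd : (fluffA.filter (fun f => f ∉ removed)).Nodup := by
        apply List.Nodup.filter
        decide
      rw [hnd.erase_eq_filter, List.filter_filter]
      apply List.filter_congr
      intro x _
      by_cases h2 : x = w
      · subst h2; simp [PySem.Set.mem_add]
      · by_cases h1 : x ∈ removed <;>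
          simp [h1, h2, PySem.Set.mem_add, bne_iff_ne]
    · rw [passB, passGen, if_neg h, if_neg (fun hB => h (hmemB.mp hB)), ih removed]

theorem fluffA_nodup : fluffA.Nodup := by decide

-- an empty 'removed' set leaves all of fluffA active
theorem filter_empty_eq :
    fluffA.filter (fun f => f ∉ (PySem.Set.empty : PySem.Set String)) = fluffA := by
  simp [PySem.Set.empty]

-- ===== VERDICT (by name: the statement is the Claim_ definition above) =====
theorem find_relevant_key_spec : Claim_equal_find_relevant_key := by
  intro name _
  unfold Spec_find_relevant_key find_relevant_key find_relevant_key_alt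
  have hfun : stepA = fun a f => a.erase f :=
    funext fun a => funext fun f => stepA_eq_erase a f
  simp only [hfun, passB_eq_passGen, filter_empty_eq,
    fun ws => passGen_eq_foldl ws fluffA fluffA_nodup]
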